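-- pv_equiv track=rewrite | github.com/chaewonS/Image-Segmentation | Main/instanceIds.py | create_label_dict
-- ===== SOURCE A (Python) =====
-- def create_label_dict(obj_list):
--     label_dict = {}
--     label_count_by_category = {}
--
--     for obj in obj_list:
--         category_id = obj['category_id']
--         if category_id not in label_count_by_category:
--             label_count_by_category[category_id] = 0
--
--         if obj['id'] not in label_dict:
--             label_dict[obj['id']] = (category_id * 1000) + label_count_by_category[category_id]
--             label_count_by_category[category_id] += 1
--
--     return label_dict
-- ===== SOURCE B (Python) =====
-- def create_label_dict(obj_list):
--     # Pass 1: first-seen category per id, in first-appearance order of ids.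
--     firsts = {}
--     for obj in obj_list:
--         firsts.setdefault(obj['id'], obj['category_id'])
--     # Pass 2: group the first-seen ids by category, preserving order.
--     groups = {}
--     for i, c in firsts.items():
--         groups.setdefault(c, []).append(i)
--     # Pass 3: label = category*1000 + position of the id within its category group.
--     return {i: c * 1000 + groups[c].index(i) for i, c in firsts.items()}
-- ===== Notes on version B (the rewrite author's own statement) =====
-- stated objective: alternative
-- what changed: A does one interleaved pass keeping a running per-category counter; B first builds the first-seen id->category table, then groups the ids by category, and finally assigns category*1000 + position-within-group via list.index.
import Mathlib
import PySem

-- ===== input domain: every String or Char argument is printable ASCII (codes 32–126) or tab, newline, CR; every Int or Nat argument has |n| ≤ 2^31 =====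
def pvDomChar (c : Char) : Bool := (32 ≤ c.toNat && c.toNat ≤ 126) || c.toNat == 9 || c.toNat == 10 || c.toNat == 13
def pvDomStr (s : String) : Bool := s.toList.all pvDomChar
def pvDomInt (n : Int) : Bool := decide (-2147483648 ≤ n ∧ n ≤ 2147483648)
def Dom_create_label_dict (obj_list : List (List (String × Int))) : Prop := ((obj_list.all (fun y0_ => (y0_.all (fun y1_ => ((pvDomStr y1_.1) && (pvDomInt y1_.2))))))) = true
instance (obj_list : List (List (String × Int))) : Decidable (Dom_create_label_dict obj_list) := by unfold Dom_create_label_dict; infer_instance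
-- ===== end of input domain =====

-- B replaces A's single interleaved pass (running per-category counter) by a first-seen
-- grouping table followed by an index-within-group lookup (objective: alternative decomposition).

-- ===== PORT A =====
-- obj['id'] / obj['category_id'] : first-match lookup in the object's assoc list;
-- outside Pre_ (a missing key) Python raises KeyError, here .getD 0 (unclaimed).
def create_label_dict (obj_list : List (List (String × Int))) : List (Int × Int) :=
  (obj_list.foldl
    (fun (st : PySem.Dict Int Int × PySem.Dict Int Int) obj =>
      let category_id := ((PySem.Dict.mk obj).get? "category_id").getD 0
      let cnt := if st.2.contains category_id then st.2 else st.2.insert category_id 0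
      let id := ((PySem.Dict.mk obj).get? "id").getD 0
      if st.1.contains id then (st.1, cnt)
      else (st.1.insert id (category_id * 1000 + cnt.getD category_id 0),
            cnt.insert category_id (cnt.getD category_id 0 + 1)))
    (PySem.Dict.empty, PySem.Dict.empty)).1.items

-- ===== PORT B =====
def create_label_dict_alt (obj_list : List (List (String × Int))) : List (Int × Int) :=
  let firsts : PySem.Dict Int Int :=
    obj_list.foldl
      (fun f obj =>
        f.setdefault (((PySem.Dict.mk obj).get? "id").getD 0)
                     (((PySem.Dict.mk obj).get? "category_id").getD 0))
      PySem.Dict.empty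
  let groups : PySem.Dict Int (List Int) :=
    firsts.items.foldl (fun g p => g.modify p.2 [] (· ++ [p.1])) PySem.Dict.empty
  firsts.items.map
    (fun p => (p.1, p.2 * 1000 + (((PySem.List.index? (groups.getD p.2 []) p.1).getD 0 : Nat) : Int)))

-- ===== PRECONDITION & SPEC =====
-- Pre_ excludes exactly the objects missing an 'id' or 'category_id' key, on which Python A raises KeyError.
def Pre_create_label_dict (obj_list : List (List (String × Int))) : Prop :=
  (obj_list.all (fun obj => obj.any (·.1 == "id") && obj.any (·.1 == "category_id"))) = true
instance (obj_list : List (List (String × Int))) : Decidable (Pre_create_label_dict obj_list) := by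
  unfold Pre_create_label_dict; infer_instance
def pvWitness_create_label_dict : (List (List (String × Int))) :=
  [[("id", 7), ("category_id", 2)], [("id", 8), ("category_id", 2)], [("id", 7), ("category_id", 1)]]

def Spec_create_label_dict (obj_list : List (List (String × Int))) (out : List (Int × Int)) : Prop := out = create_label_dict_alt obj_list
instance (obj_list : List (List (String × Int))) (out : List (Int × Int)) : Decidable (Spec_create_label_dict obj_list out) := by unfold Spec_create_label_dict; infer_instance

-- ===== CLAIM (what is proved, stated in full; the proofs are below) =====
def Claim_equal_create_label_dict : Prop := ∀ (obj_list : List (List (String × Int))), Dom_create_label_dict obj_list → Pre_create_label_dict obj_list → Spec_create_label_dict obj_list (create_label_dict obj_list)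

-- ===== LEMMAS AND PROOFS =====


-- helper step functions (proof-only): the A-loop body and the firsts-loop body on (id, category) pairs
def pvStepA (st : PySem.Dict Int Int × PySem.Dict Int Int) (p : Int × Int) :
    PySem.Dict Int Int × PySem.Dict Int Int :=
  let cnt := if st.2.contains p.2 then st.2 else st.2.insert p.2 0
  if st.1.contains p.1 then (st.1, cnt)
  else (st.1.insert p.1 (p.2 * 1000 + cnt.getD p.2 0), cnt.insert p.2 (cnt.getD p.2 0 + 1))

def pvStepF (f : PySem.Dict Int Int) (p : Int × Int) : PySem.Dict Int Int :=
  f.setdefault p.1 p.2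

-- the per-category group: first-seen ids of category c, in order
def pvGrp (f : PySem.Dict Int Int) (c : Int) : List Int :=
  (f.items.filter (fun p => p.2 == c)).map (·.1)

def pvPhi (f : PySem.Dict Int Int) (p : Int × Int) : Int × Int :=
  (p.1, p.2 * 1000 + (((PySem.List.index? (pvGrp f p.2) p.1).getD 0 : Nat) : Int))

theorem pv_groups_getD (l : List (Int × Int)) (c : Int) :
    (l.foldl (fun (g : PySem.Dict Int (List Int)) p => g.modify p.2 [] (· ++ [p.1]))
      PySem.Dict.empty).getD c []
      = (l.filter (fun p => p.2 == c)).map (·.1) := by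
  have h : (l.foldl (fun (g : PySem.Dict Int (List Int)) p => g.modify p.2 [] (· ++ [p.1]))
      PySem.Dict.empty)
      = ((l.map (fun p => (p.2, p.1))).foldl
          (fun (g : PySem.Dict Int (List Int)) q => g.modify q.1 [] (· ++ [q.2]))
          PySem.Dict.empty) := by
    rw [List.foldl_map]
  rw [h, PySem.Dict.getD_foldl_modify_append]
  simp only [PySem.Dict.getD_empty, List.nil_append, List.filter_map, List.map_map]
  rfl


theorem pv_main (l : List (Int × Int)) :
    (l.foldl pvStepA (PySem.Dict.empty, PySem.Dict.empty)).1.items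
        = (l.foldl pvStepF PySem.Dict.empty).items.map
            (pvPhi (l.foldl pvStepF PySem.Dict.empty))
    ∧ (∀ c, (l.foldl pvStepA (PySem.Dict.empty, PySem.Dict.empty)).2.getD c 0
        = ((pvGrp (l.foldl pvStepF PySem.Dict.empty) c).length : Int))
    ∧ (∀ p ∈ (l.foldl pvStepF PySem.Dict.empty).items,
        (l.foldl pvStepA (PySem.Dict.empty, PySem.Dict.empty)).2.contains p.2 = true) := by
  induction l using List.reverseRecOn with
  | nil =>
    simp only [List.foldl_nil]
    refine ⟨rfl, fun c => ?_, fun p hp => ?_⟩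
    · rw [PySem.Dict.getD_empty]; simp [pvGrp, PySem.Dict.empty]
    · simp [PySem.Dict.empty] at hp
  | append_singleton l a ih =>
    obtain ⟨i, c⟩ := a
    obtain ⟨h1, h2, h3⟩ := ih
    simp only [List.foldl_append, List.foldl_cons, List.foldl_nil]
    -- abbreviations
    have hkeys : (l.foldl pvStepA (PySem.Dict.empty, PySem.Dict.empty)).1.keys
        = (l.foldl pvStepF PySem.Dict.empty).keys := by
      show (l.foldl pvStepA (PySem.Dict.empty, PySem.Dict.empty)).1.items.map (·.1)
          = (l.foldl pvStepF PySem.Dict.empty).items.map (·.1)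
      rw [h1, List.map_map]
      apply List.map_congr_left
      intro p _
      rfl
    have hcont : (l.foldl pvStepA (PySem.Dict.empty, PySem.Dict.empty)).1.contains i
        = (l.foldl pvStepF PySem.Dict.empty).contains i := by
      rw [PySem.Dict.contains_eq_decide_mem_keys, PySem.Dict.contains_eq_decide_mem_keys, hkeys]
    set st := l.foldl pvStepA (PySem.Dict.empty, PySem.Dict.empty) with hst
    set f := l.foldl pvStepF PySem.Dict.empty with hf
    have hcnt1D : ∀ c', (if st.2.contains c then st.2 else st.2.insert c 0).getD c' 0
        = st.2.getD c' 0 := by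
      intro c'
      by_cases hc : st.2.contains c = true
      · simp [hc]
      · simp only [Bool.not_eq_true] at hc
        simp only [hc, Bool.false_eq_true, if_false]
        rw [PySem.Dict.getD_insert]
        split
        · next he => rw [he]; exact (PySem.Dict.getD_of_not_contains st.2 0 hc).symm
        · rfl
    have hcnt1C : ∀ x, st.2.contains x = true →
        (if st.2.contains c then st.2 else st.2.insert c 0).contains x = true := by
      intro x hx
      by_cases hc : st.2.contains c = true
      · simpa [hc]
      · simp only [Bool.not_eq_true] at hc
        simp only [hc, Bool.false_eq_true, if_false]
        rw [PySem.Dict.contains_insert, hx, Bool.or_true]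
    by_cases hfc : f.contains i = true
    · -- duplicate id: nothing changes in label_dict / firsts
      have hsd : pvStepF f (i, c) = f := by
        show f.setdefault i c = f
        exact PySem.Dict.setdefault_of_contains f _ hfc
      have hA : pvStepA st (i, c) = (st.1, if st.2.contains c then st.2 else st.2.insert c 0) := by
        simp [pvStepA, hcont.trans hfc]
      rw [hsd, hA]
      refine ⟨h1, ?_, ?_⟩
      · intro c'; rw [hcnt1D c']; exact h2 c'
      · intro p hp; exact hcnt1C _ (h3 p hp)
    · -- new id
      simp only [Bool.not_eq_true] at hfc
      have hnotmem : i ∉ f.keys := by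
        have := PySem.Dict.contains_eq_decide_mem_keys (d := f) (k := i)
        rw [hfc] at this
        simpa using this.symm
      have hsd : pvStepF f (i, c) = f.insert i c := by
        show f.setdefault i c = f.insert i c
        exact PySem.Dict.setdefault_of_not_contains f _ hfc
      have hitems' : (f.insert i c).items = f.items ++ [(i, c)] :=
        PySem.Dict.items_insert_of_not_contains f c hfc
      have hstc : st.1.contains i = false := hcont.trans hfc
      have hA : pvStepA st (i, c)
          = (st.1.insert i (c * 1000 + (if st.2.contains c then st.2 else st.2.insert c 0).getD c 0),
             (if st.2.contains c then st.2 else st.2.insert c 0).insert c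
               ((if st.2.contains c then st.2 else st.2.insert c 0).getD c 0 + 1)) := by
        simp only [pvStepA, hstc]
        rfl
      have hlen : (if st.2.contains c then st.2 else st.2.insert c 0).getD c 0
          = ((pvGrp f c).length : Int) := (hcnt1D c).trans (h2 c)
      have hgrp_self : pvGrp (f.insert i c) c = pvGrp f c ++ [i] := by
        simp [pvGrp, hitems', List.filter_append]
      have hgrp_ne : ∀ c', c' ≠ c → pvGrp (f.insert i c) c' = pvGrp f c' := by
        intro c' hne
        simp [pvGrp, hitems', List.filter_append, hne.symm]
      have hi_notin : ∀ c', i ∉ pvGrp f c' := by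
        intro c' hmem
        apply hnotmem
        simp only [pvGrp, List.mem_map] at hmem
        obtain ⟨p, hp, hpi⟩ := hmem
        exact hpi ▸ List.mem_map_of_mem (List.mem_of_mem_filter hp) (f := (·.1))
      have hmem_grp : ∀ p ∈ f.items, p.1 ∈ pvGrp f p.2 := by
        intro p hp
        simp only [pvGrp, List.mem_map]
        exact ⟨p, List.mem_filter.2 ⟨hp, by simp⟩, rfl⟩
      rw [hsd, hA]
      refine ⟨?_, ?_, ?_⟩
      · -- items equation
        rw [PySem.Dict.items_insert_of_not_contains _ _ hstc, hitems', List.map_append, h1]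
        congr 1
        · apply List.map_congr_left
          intro p hp
          simp only [pvPhi]
          by_cases hpc : p.2 = c
          · rw [hpc, hgrp_self,
              PySem.List.index?_append_of_mem _ (hpc ▸ hmem_grp p hp)]
          · rw [hgrp_ne _ hpc]
        · simp only [pvPhi, hgrp_self, List.map_cons, List.map_nil,
            PySem.List.index?_append_singleton_self (pvGrp f c) i (hi_notin c),
            Option.getD_some, hlen]
      · -- counter equation
        intro c'
        rw [PySem.Dict.getD_insert]
        by_cases hcc : c' = c
        · rw [if_pos hcc, hlen, hcc, hgrp_self]
          simp
        · rw [if_neg hcc, hcnt1D c', h2 c', hgrp_ne _ hcc]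
      · -- containment
        intro p hp
        rw [hitems'] at hp
        rcases List.mem_append.1 hp with hp | hp
        · rw [PySem.Dict.contains_insert]
          rw [hcnt1C _ (h3 p hp), Bool.or_true]
        · simp only [List.mem_singleton] at hp
          rw [hp]
          exact PySem.Dict.contains_insert_self _ _ _

theorem create_label_dict_spec : Claim_equal_create_label_dict := by
  intro obj_list _ _
  unfold Spec_create_label_dict create_label_dict create_label_dict_alt
  have hA : ∀ init, obj_list.foldl
      (fun (st : PySem.Dict Int Int × PySem.Dict Int Int) obj =>
        let category_id := ((PySem.Dict.mk obj).get? "category_id").getD 0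
        let cnt := if st.2.contains category_id then st.2 else st.2.insert category_id 0
        let id := ((PySem.Dict.mk obj).get? "id").getD 0
        if st.1.contains id then (st.1, cnt)
        else (st.1.insert id (category_id * 1000 + cnt.getD category_id 0),
              cnt.insert category_id (cnt.getD category_id 0 + 1))) init
      = (obj_list.map (fun obj => (((PySem.Dict.mk obj).get? "id").getD 0,
            ((PySem.Dict.mk obj).get? "category_id").getD 0))).foldl pvStepA init := by
    intro init; rw [List.foldl_map]; rfl
  have hF : ∀ init, obj_list.foldl
      (fun (f : PySem.Dict Int Int) obj =>
        f.setdefault (((PySem.Dict.mk obj).get? "id").getD 0)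
                     (((PySem.Dict.mk obj).get? "category_id").getD 0)) init
      = (obj_list.map (fun obj => (((PySem.Dict.mk obj).get? "id").getD 0,
            ((PySem.Dict.mk obj).get? "category_id").getD 0))).foldl pvStepF init := by
    intro init; rw [List.foldl_map]; rfl
  rw [hA, hF]
  obtain ⟨h1, -, -⟩ := pv_main (obj_list.map (fun obj => (((PySem.Dict.mk obj).get? "id").getD 0,
            ((PySem.Dict.mk obj).get? "category_id").getD 0)))
  rw [h1]
  apply List.map_congr_left
  intro p _
  simp only [pvPhi, pv_groups_getD, pvGrp]
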